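-- pv_equiv track=rewrite | github.com/theangrygamershowproductions/DevOnboarder | tools/pin_action_uses.py | split_inline_comment
-- ===== SOURCE A (Python) =====
-- def split_inline_comment(line: str) -> tuple[str, str]:
--     """Split YAML inline comment starting at first # outside quotes."""
--     in_single = False
--     in_double = False
--     for i, ch in enumerate(line):
--         if ch == "'" and not in_double:
--             in_single = not in_single
--         elif ch == '"' and not in_single:
--             in_double = not in_double
--         elif ch == "#" and not in_single and not in_double:
--             return line[:i].rstrip(), line[i:]  # keep comment including '#'
--     return line.rstrip(), ""
-- ===== SOURCE B (Python) =====
-- import re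
--
-- _TOKEN = re.compile(r"'[^']*'?|\"[^\"]*\"?|#")
--
-- def split_inline_comment(line: str) -> tuple[str, str]:
--     """Split YAML inline comment starting at first # outside quotes."""
--     for m in _TOKEN.finditer(line):
--         if m.group() == "#":
--             i = m.start()
--             return line[:i].rstrip(), line[i:]
--     return line.rstrip(), ""
-- ===== Notes on version B (the rewrite author's own statement) =====
-- stated objective: idiomatic
-- what changed: Replaced the manual in_single/in_double boolean state machine with a regex (re.finditer) that tokenizes quoted spans (closing quote optional, so unterminated quotes swallow the rest) and bare hash characters, splitting at the first hash token.
import Mathlib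
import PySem

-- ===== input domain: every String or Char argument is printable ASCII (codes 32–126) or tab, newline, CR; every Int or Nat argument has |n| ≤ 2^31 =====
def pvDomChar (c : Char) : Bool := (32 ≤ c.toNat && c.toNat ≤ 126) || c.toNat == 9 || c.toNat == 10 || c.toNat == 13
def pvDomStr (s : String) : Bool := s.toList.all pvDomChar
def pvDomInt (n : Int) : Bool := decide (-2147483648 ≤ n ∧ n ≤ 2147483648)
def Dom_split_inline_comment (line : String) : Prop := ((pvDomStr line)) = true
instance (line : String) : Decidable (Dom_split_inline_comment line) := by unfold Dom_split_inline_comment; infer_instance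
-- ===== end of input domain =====

-- B replaces A's in_single/in_double state machine by a left-to-right tokenizer that consumes
-- whole quoted spans (unterminated span = rest of line) and stops at the first bare '#'; idiomatic, same cost.

-- ===== PORT A =====
-- A's for-loop over enumerate(line) with flags in_single/in_double; i is the enumerate index.
-- line[:i] = take i and line[i:] = drop i since 0 ≤ i ≤ len(line) here.
def aLoop (line : List Char) (i : Nat) (cs : List Char) (insq indq : Bool) : String × String :=
  match cs with
  | [] => (String.ofList (PySem.Chars.rstrip line), "")
  | c :: rest =>
    if c = '\'' ∧ indq = false then aLoop line (i+1) rest (!insq) indq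
    else if c = '"' ∧ insq = false then aLoop line (i+1) rest insq (!indq)
    else if c = '#' ∧ insq = false ∧ indq = false then
      (String.ofList (PySem.Chars.rstrip (line.take i)), String.ofList (line.drop i))
    else aLoop line (i+1) rest insq indq

def split_inline_comment (line : String) : String × String :=
  aLoop line.toList 0 line.toList false false

-- ===== PORT B =====
-- hand port of the regex r"'[^']*'?|\"[^\"]*\"?|#" scanned by finditer (exact: the engine,
-- anchored left to right, consumes a quoted span through its closing quote — or to the end
-- of the line when unterminated — as one token, and reports the first '#' token's start).
-- bConsume q cs = (remainder after the span [^q]*q?, number of chars consumed)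
def bConsume (q : Char) (cs : List Char) : List Char × Nat :=
  match cs with
  | [] => ([], 0)
  | c :: rest =>
    if c = q then (rest, 1)
    else ((bConsume q rest).1, (bConsume q rest).2 + 1)

theorem bConsume_fst_length_le (q : Char) (cs : List Char) : (bConsume q cs).1.length ≤ cs.length := by
  induction cs with
  | nil => simp [bConsume]
  | cons c rest ih =>
    simp only [bConsume]
    split
    · simp
    · simpa using Nat.le_succ_of_le ih

-- bFind cs i = start index of the first '#' token, scanning cs which begins at index i
def bFind (cs : List Char) (i : Nat) : Option Nat :=
  match h : cs with
  | [] => none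
  | c :: rest =>
    if c = '\'' then bFind (bConsume '\'' rest).1 (i + 1 + (bConsume '\'' rest).2)
    else if c = '"' then bFind (bConsume '"' rest).1 (i + 1 + (bConsume '"' rest).2)
    else if c = '#' then some i
    else bFind rest (i+1)
termination_by cs.length
decreasing_by
  · exact Nat.lt_succ_of_le (bConsume_fst_length_le _ _)
  · exact Nat.lt_succ_of_le (bConsume_fst_length_le _ _)
  · simp

def split_inline_comment_alt (line : String) : String × String :=
  match bFind line.toList 0 with
  | some i => (String.ofList (PySem.Chars.rstrip (line.toList.take i)), String.ofList (line.toList.drop i))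
  | none => (String.ofList (PySem.Chars.rstrip line.toList), "")

-- ===== PRECONDITION & SPEC =====
def Spec_split_inline_comment (line : String) (out : String × String) : Prop := out = split_inline_comment_alt line
instance (line : String) (out : String × String) : Decidable (Spec_split_inline_comment line out) := by unfold Spec_split_inline_comment; infer_instance

-- ===== CLAIM (what is proved, stated in full; the proofs are below) =====
def Claim_equal_split_inline_comment : Prop := ∀ (line : String), Dom_split_inline_comment line → Spec_split_inline_comment line (split_inline_comment line)

-- ===== LEMMAS AND PROOFS =====

-- inside a single-quoted span A just scans for the closing quote: it behaves like bConsume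
theorem aLoop_single (line : List Char) (cs : List Char) (i : Nat) :
    aLoop line i cs true false = aLoop line (i + (bConsume '\'' cs).2) (bConsume '\'' cs).1 false false := by
  induction cs generalizing i with
  | nil => simp [aLoop, bConsume]
  | cons c rest ih =>
    by_cases hc : c = '\''
    · subst hc
      simp only [bConsume, if_pos rfl]
      rw [aLoop, if_pos ⟨rfl, rfl⟩]
      simp
    · simp only [aLoop, bConsume, if_neg hc,
        if_neg (show ¬(c = '\'' ∧ (false : Bool) = false) from fun h => hc h.1),
        if_neg (show ¬(c = '"' ∧ (true : Bool) = false) by simp),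
        if_neg (show ¬(c = '#' ∧ (true : Bool) = false ∧ (false : Bool) = false) by simp)]
      rw [if_neg (fun h => hc h.1), if_neg (by simp), ih (i+1)]
      have : i + ((bConsume '\'' rest).2 + 1) = i + 1 + (bConsume '\'' rest).2 := by omega
      rw [this]

-- inside a double-quoted span likewise
theorem aLoop_double (line : List Char) (cs : List Char) (i : Nat) :
    aLoop line i cs false true = aLoop line (i + (bConsume '"' cs).2) (bConsume '"' cs).1 false false := by
  induction cs generalizing i with
  | nil => simp [aLoop, bConsume]
  | cons c rest ih =>
    by_cases hc : c = '"'
    · subst hc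
      simp only [bConsume, if_pos rfl]
      rw [aLoop, if_neg (show ¬('"' = '\'' ∧ (true : Bool) = false) by simp), if_pos ⟨rfl, rfl⟩]
      simp
    · simp only [aLoop, bConsume, if_neg hc,
        if_neg (show ¬(c = '\'' ∧ (true : Bool) = false) by simp),
        if_neg (show ¬(c = '"' ∧ (false : Bool) = false) from fun h => hc h.1),
        if_neg (show ¬(c = '#' ∧ (false : Bool) = false ∧ (true : Bool) = false) by simp)]
      rw [if_neg (fun h => hc h.1), if_neg (by simp), ih (i+1)]
      have : i + ((bConsume '"' rest).2 + 1) = i + 1 + (bConsume '"' rest).2 := by omega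
      rw [this]

-- the main invariant: from the neutral state A's loop computes exactly B's split
theorem aLoop_eq_bFind (line : List Char) (cs : List Char) (i : Nat) :
    aLoop line i cs false false =
      match bFind cs i with
      | some j => (String.ofList (PySem.Chars.rstrip (line.take j)), String.ofList (line.drop j))
      | none => (String.ofList (PySem.Chars.rstrip line), "") := by
  fun_induction bFind cs i with
  | case1 => simp [aLoop]
  | case2 i rest ih =>
    rw [aLoop, if_pos ⟨rfl, rfl⟩]
    rw [show (!false) = true from rfl, aLoop_single, ih]
  | case3 i rest h ih =>
    rw [aLoop, if_neg (show ¬('"' = '\'' ∧ (false : Bool) = false) by simp), if_pos ⟨rfl, rfl⟩]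
    rw [show (!false) = true from rfl, aLoop_double, ih]
  | case4 i rest h1 h2 =>
    rw [aLoop, if_neg (fun h => h1 h.1), if_neg (fun h => h2 h.1), if_pos ⟨rfl, rfl, rfl⟩]
  | case5 i c rest h1 h2 h3 ih =>
    rw [aLoop, if_neg (fun h => h1 h.1), if_neg (fun h => h2 h.1), if_neg (fun h => h3 h.1), ih]

-- ===== VERDICT (by name: the statement is the Claim_ definition above) =====
theorem split_inline_comment_spec : Claim_equal_split_inline_comment := by
  intro line _
  unfold Spec_split_inline_comment split_inline_comment split_inline_comment_alt
  rw [aLoop_eq_bFind]
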